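-- pv_equiv track=rewrite | github.com/LeBronBao/Text_Classifier | lda_model.py | get_same_words
-- ===== SOURCE A (Python) =====
-- def get_same_words(dict_list):
--     all_words_dict = {}
--     for dict in dict_list:
--         words = dict.keys()
--         for word in words:
--             if word not in all_words_dict.keys():
--                 all_words_dict[word] = 0
--
--     for dict in dict_list:
--         words = dict.keys()
--         for word in words:
--             if word in all_words_dict.keys():
--                 all_words_dict[word] += 1
--
--     return all_words_dict
-- ===== SOURCE B (Python) =====
-- def get_same_words(dict_list):
--     # Collect the distinct words in first-occurrence order, then count,
--     # per word, in how many dicts it appears by scanning dict_list.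
--     words = dict.fromkeys(w for d in dict_list for w in d)
--     return {w: sum(1 for d in dict_list if w in d) for w in words}
-- ===== Notes on version B (the rewrite author's own statement) =====
-- stated objective: alternative
-- what changed: Inverts the loop structure: instead of A's two passes over dict_list updating a counting dict per key, B first gathers the distinct words in first-occurrence order and then, per word, scans dict_list once counting membership.
import Mathlib
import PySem

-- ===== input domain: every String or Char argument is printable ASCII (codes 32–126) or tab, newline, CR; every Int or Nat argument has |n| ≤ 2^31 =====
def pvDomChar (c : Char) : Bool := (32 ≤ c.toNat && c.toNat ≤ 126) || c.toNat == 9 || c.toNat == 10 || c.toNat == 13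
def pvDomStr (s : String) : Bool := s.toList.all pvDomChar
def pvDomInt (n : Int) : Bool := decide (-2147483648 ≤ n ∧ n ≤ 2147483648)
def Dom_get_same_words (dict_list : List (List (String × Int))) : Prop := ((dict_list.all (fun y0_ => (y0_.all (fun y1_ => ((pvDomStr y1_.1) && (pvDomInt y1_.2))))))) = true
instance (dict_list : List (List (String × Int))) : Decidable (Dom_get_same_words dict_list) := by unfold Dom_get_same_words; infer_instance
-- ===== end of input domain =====

-- B inverts A's loops: it gathers the distinct words first and then, per word, scans dict_list counting membership; objective: alternative.

-- ===== PORT A =====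
def get_same_words (dict_list : List (List (String × Int))) : List (String × Int) :=
  -- first loop: insert every word with value 0 if not yet present
  let all_words_dict : PySem.Dict String Int :=
    dict_list.foldl (fun all_words_dict d =>
      (PySem.Dict.ofList d).keys.foldl (fun all_words_dict word =>
        if all_words_dict.contains word then all_words_dict
        else all_words_dict.insert word 0) all_words_dict) PySem.Dict.empty
  -- second loop: increment the entry of every word of every dict (guarded by membership, as in A)
  let all_words_dict :=
    dict_list.foldl (fun all_words_dict d =>
      (PySem.Dict.ofList d).keys.foldl (fun all_words_dict word =>
        if all_words_dict.contains word then
          all_words_dict.insert word (all_words_dict.getD word 0 + 1)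
        else all_words_dict) all_words_dict) all_words_dict
  all_words_dict.items

-- ===== PORT B =====
def get_same_words_alt (dict_list : List (List (String × Int))) : List (String × Int) :=
  -- 'words': distinct words in first-occurrence order (dict.fromkeys = PySem.List.dedup)
  let words : List String :=
    PySem.List.dedup (dict_list.flatMap (fun d => (PySem.Dict.ofList d).keys))
  -- per word, count the dicts that contain it
  words.map (fun w =>
    (w, dict_list.foldl (fun acc d =>
          if (PySem.Dict.ofList d).contains w then acc + 1 else acc) (0 : Int)))

-- ===== PRECONDITION & SPEC =====
def Spec_get_same_words (dict_list : List (List (String × Int))) (out : List (String × Int)) : Prop := out = get_same_words_alt dict_list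
instance (dict_list : List (List (String × Int))) (out : List (String × Int)) : Decidable (Spec_get_same_words dict_list out) := by unfold Spec_get_same_words; infer_instance

-- ===== CLAIM (what is proved, stated in full; the proofs are below) =====
def Claim_equal_get_same_words : Prop := ∀ (dict_list : List (List (String × Int))), Dom_get_same_words dict_list → Spec_get_same_words dict_list (get_same_words dict_list)

-- ===== LEMMAS AND PROOFS =====

-- the two loop bodies of A over a single word
def pvStepInit (d : PySem.Dict String Int) (w : String) : PySem.Dict String Int :=
  if d.contains w then d else d.insert w 0
def pvStepIncr (d : PySem.Dict String Int) (w : String) : PySem.Dict String Int :=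
  if d.contains w then d.insert w (d.getD w 0 + 1) else d

-- a nested fold over the key lists is a fold over the flattened word list
lemma pv_foldl_flatMap {β γ δ : Type} (L : List β) (k : β → List γ) (g : δ → γ → δ) (init : δ) :
    L.foldl (fun a x => (k x).foldl g a) init = (L.flatMap k).foldl g init := by
  induction L generalizing init with
  | nil => rfl
  | cons x xs ih => simp [List.flatMap_cons, List.foldl_append, ih]

lemma pv_contains_mono (ws : List String) (d : PySem.Dict String Int) (x : String)
    (h : d.contains x = true) : (ws.foldl pvStepInit d).contains x = true := by
  induction ws generalizing d with
  | nil => exact h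
  | cons w ws ih =>
    rw [List.foldl_cons]
    apply ih
    unfold pvStepInit
    split
    · exact h
    · simp [PySem.Dict.contains_insert, h]

lemma pv_contains_of_mem (ws : List String) (d : PySem.Dict String Int) (x : String)
    (h : x ∈ ws) : (ws.foldl pvStepInit d).contains x = true := by
  induction ws generalizing d with
  | nil => cases h
  | cons w ws ih =>
    rw [List.foldl_cons]
    rcases List.mem_cons.mp h with h | h
    · subst h
      apply pv_contains_mono
      unfold pvStepInit
      split
      · assumption
      · exact PySem.Dict.contains_insert_self _ _ _
    · exact ih _ h

lemma pv_getD_init (ws : List String) (d : PySem.Dict String Int)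
    (h : ∀ k, d.getD k 0 = 0) (k : String) : (ws.foldl pvStepInit d).getD k 0 = 0 := by
  induction ws generalizing d with
  | nil => exact h k
  | cons w ws ih =>
    rw [List.foldl_cons]
    apply ih
    intro k'
    unfold pvStepInit
    split
    · exact h k'
    · rw [PySem.Dict.getD_insert]
      split <;> simp [h]

lemma pv_keys_init (ws : List String) (d : PySem.Dict String Int)
    (h : d.keys.Nodup) : (ws.foldl pvStepInit d).keys = PySem.Set.update d.keys ws := by
  induction ws generalizing d with
  | nil => rfl
  | cons w ws ih =>
    rw [List.foldl_cons]
    have hstep : (pvStepInit d w).keys = PySem.Set.add d.keys w := by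
      unfold pvStepInit PySem.Set.add
      by_cases hc : d.contains w = true
      · rw [if_pos hc]
        have : PySem.Set.contains d.keys w = true := by
          simpa [PySem.Set.contains, ← PySem.Dict.contains_iff_mem_keys] using hc
        rw [if_pos this]
      · have hc' : d.contains w = false := by simpa using hc
        rw [if_neg hc, PySem.Dict.keys_insert_of_not_contains _ _ hc']
        have hnm : w ∉ d.keys := fun hm => by
          rw [(PySem.Dict.contains_iff_mem_keys _ _).mpr hm] at hc'; cases hc'
        rw [if_neg (by simp [hnm])]
    have hnd : (pvStepInit d w).keys.Nodup := by
      unfold pvStepInit; split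
      · exact h
      · exact PySem.Dict.nodup_keys_insert _ _ _ h
    rw [ih _ hnd, hstep]
    rfl

lemma pv_keys_incr (ws : List String) (d : PySem.Dict String Int) :
    (ws.foldl pvStepIncr d).keys = d.keys := by
  induction ws generalizing d with
  | nil => rfl
  | cons w ws ih =>
    rw [List.foldl_cons, ih]
    unfold pvStepIncr
    split
    · exact PySem.Dict.keys_insert_of_contains _ _ (by assumption)
    · rfl

lemma pv_getD_incr (ws : List String) (d : PySem.Dict String Int) (k : String)
    (h : ∀ x ∈ ws, d.contains x = true) :
    (ws.foldl pvStepIncr d).getD k 0 = d.getD k 0 + ws.count k := by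
  induction ws generalizing d with
  | nil => simp
  | cons w ws ih =>
    have hw : d.contains w = true := h w (List.mem_cons_self)
    rw [List.foldl_cons]
    have hstep : pvStepIncr d w = d.insert w (d.getD w 0 + 1) := by
      unfold pvStepIncr; rw [if_pos hw]
    rw [hstep, ih _ (fun x hx => by
      simp [PySem.Dict.contains_insert, h x (List.mem_cons_of_mem _ hx)])]
    rw [PySem.Dict.getD_insert, List.count_cons]
    by_cases hk : k = w
    · subst hk; simp; omega
    · simp [hk, Ne.symm hk]

-- the count of w in the flattened key stream is the number of dicts containing w
lemma pv_count_flatMap (L : List (List (String × Int))) (w : String) :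
    (L.flatMap (fun d => (PySem.Dict.ofList d).keys)).count w
      = L.countP (fun d => (PySem.Dict.ofList d).contains w) := by
  induction L with
  | nil => rfl
  | cons d L ih =>
    rw [List.flatMap_cons, List.count_append, ih, List.countP_cons]
    have hnd : (PySem.Dict.ofList d).keys.Nodup := PySem.Dict.nodup_keys_ofList d
    by_cases hc : (PySem.Dict.ofList d).contains w = true
    · have hm : w ∈ (PySem.Dict.ofList d).keys :=
        (PySem.Dict.contains_iff_mem_keys _ _).mp hc
      have : (PySem.Dict.ofList d).keys.count w = 1 :=
        List.count_eq_one_of_mem hnd hm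
      simp [this, hc]; omega
    · have hc' : (PySem.Dict.ofList d).contains w = false := by simpa using hc
      have hm : w ∉ (PySem.Dict.ofList d).keys := fun hm => by
        rw [(PySem.Dict.contains_iff_mem_keys _ _).mpr hm] at hc'; cases hc'
      simp [List.count_eq_zero_of_not_mem hm, hc']

-- ===== VERDICT (by name: the statement is the Claim_ definition above) =====
theorem get_same_words_spec : Claim_equal_get_same_words := by
  intro dict_list _
  unfold Spec_get_same_words get_same_words get_same_words_alt
  show (dict_list.foldl (fun a d => ((PySem.Dict.ofList d).keys).foldl pvStepIncr a)
          (dict_list.foldl (fun a d => ((PySem.Dict.ofList d).keys).foldl pvStepInit a)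
            PySem.Dict.empty)).items
      = (PySem.List.dedup (dict_list.flatMap (fun d => (PySem.Dict.ofList d).keys))).map (fun w =>
            (w, dict_list.foldl (fun acc d =>
                  if (PySem.Dict.ofList d).contains w then acc + 1 else acc) (0 : Int)))
  rw [pv_foldl_flatMap dict_list _ pvStepInit, pv_foldl_flatMap dict_list _ pvStepIncr]
  set ws := dict_list.flatMap (fun d => (PySem.Dict.ofList d).keys) with hws
  rw [PySem.List.dedup_eq_ofList]
  -- B's per-word value is the count of w in the word stream
  have hval : ∀ w : String, (dict_list.foldl (fun acc d =>
      if (PySem.Dict.ofList d).contains w then acc + 1 else acc) (0 : Int)) = (ws.count w : Int) := by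
    intro w
    rw [PySem.List.foldl_if_add_one, pv_count_flatMap]
    simp
  -- A's items are keys = ordered dedup of ws, values = counts
  have hA : (ws.foldl pvStepIncr (ws.foldl pvStepInit PySem.Dict.empty)).items
      = (PySem.Set.ofList ws).map (fun w => (w, (ws.count w : Int))) := by
    have hkeys : (ws.foldl pvStepIncr (ws.foldl pvStepInit PySem.Dict.empty)).keys
        = PySem.Set.ofList ws := by
      rw [pv_keys_incr, pv_keys_init _ _ PySem.Dict.nodup_keys_empty]
      rfl
    have hnd : (ws.foldl pvStepIncr (ws.foldl pvStepInit PySem.Dict.empty)).keys.Nodup := by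
      rw [hkeys]; exact PySem.Set.nodup_ofList ws
    rw [PySem.Dict.items_eq_map_keys _ hnd 0, hkeys]
    apply List.map_congr_left
    intro w hw
    have hmem : w ∈ ws := (PySem.Set.mem_ofList _ _).mp hw
    rw [pv_getD_incr ws _ w (fun x hx => pv_contains_of_mem ws _ x hx),
      pv_getD_init ws _ (fun k => PySem.Dict.getD_empty _ _)]
    simp
  rw [hA]
  apply List.map_congr_left
  intro w _
  rw [hval]
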